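-- pv_equiv track=rewrite | github.com/rosariopgonzalez/bingo | src/bingo.py | celdas_ocupadas_consecutivas
-- ===== SOURCE A (Python) =====
-- def celdas_ocupadas_consecutivas(mi_carton):
--     for fila in mi_carton:
--         contador = 0
--         for celda in fila:
--             if celda == 0:
--                 contador = 0
--             else:
--                 contador += 1
--             if contador == 3:
--                 return False
--     return True
-- ===== SOURCE B (Python) =====
-- def celdas_ocupadas_consecutivas(mi_carton):
--     return not any(
--         all(c != 0 for c in fila[i:i + 3])
--         for fila in mi_carton
--         for i in range(len(fila) - 2)
--     )
-- ===== Notes on version B (the rewrite author's own statement) =====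
-- stated objective: idiomatic
-- what changed: Replaces the stateful running-counter scan with early return by a declarative sliding-window check: not any(all 3 cells of window nonzero) over all length-3 windows of each row.
import Mathlib
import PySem

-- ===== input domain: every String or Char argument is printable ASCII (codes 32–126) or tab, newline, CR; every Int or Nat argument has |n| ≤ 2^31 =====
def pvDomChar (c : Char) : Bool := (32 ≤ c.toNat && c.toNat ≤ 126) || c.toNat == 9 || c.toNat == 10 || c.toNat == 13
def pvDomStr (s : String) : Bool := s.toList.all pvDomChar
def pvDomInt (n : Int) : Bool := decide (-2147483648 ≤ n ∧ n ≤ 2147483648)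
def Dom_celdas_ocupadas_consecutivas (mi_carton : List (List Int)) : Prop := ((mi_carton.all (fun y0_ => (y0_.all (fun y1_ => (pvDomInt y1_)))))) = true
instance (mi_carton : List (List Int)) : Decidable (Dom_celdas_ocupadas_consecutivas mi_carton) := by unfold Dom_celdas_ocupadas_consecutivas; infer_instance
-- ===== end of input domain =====

-- B replaces A's stateful running-counter scan (with early return) by a declarative
-- sliding-window check over all length-3 windows of each row (idiomatic; same cost).

-- ===== PORT A =====
-- inner loop of A: scan a row keeping the running counter, return true when it hits 3
def pvRowHit : List Int → Int → Bool
  | [], _ => false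
  | celda :: fila, contador =>
    let contador := if celda = 0 then 0 else contador + 1
    if contador = 3 then true else pvRowHit fila contador

def celdas_ocupadas_consecutivas : List (List Int) → Bool
  | [] => true
  | fila :: rest =>
    if pvRowHit fila 0 then false else celdas_ocupadas_consecutivas rest

-- ===== PORT B =====
def celdas_ocupadas_consecutivas_alt (mi_carton : List (List Int)) : Bool :=
  !(mi_carton.any fun fila =>
      (List.range (fila.length - 2)).any fun i =>
        ((fila.drop i).take 3).all (fun c => decide (c ≠ 0)))

-- ===== PRECONDITION & SPEC =====
def Spec_celdas_ocupadas_consecutivas (mi_carton : List (List Int)) (out : Bool) : Prop := out = celdas_ocupadas_consecutivas_alt mi_carton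
instance (mi_carton : List (List Int)) (out : Bool) : Decidable (Spec_celdas_ocupadas_consecutivas mi_carton out) := by unfold Spec_celdas_ocupadas_consecutivas; infer_instance

-- ===== CLAIM (what is proved, stated in full; the proofs are below) =====
def Claim_equal_celdas_ocupadas_consecutivas : Prop := ∀ (mi_carton : List (List Int)), Dom_celdas_ocupadas_consecutivas mi_carton → Spec_celdas_ocupadas_consecutivas mi_carton (celdas_ocupadas_consecutivas mi_carton)

-- ===== LEMMAS AND PROOFS =====

-- first element nonzero
def pvPre1 : List Int → Bool
  | [] => false
  | a :: _ => decide (a ≠ 0)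

-- first two elements nonzero
def pvPre2 : List Int → Bool
  | [] => false
  | a :: r => decide (a ≠ 0) && pvPre1 r

-- some 3 consecutive elements nonzero
def pvHasRun3 : List Int → Bool
  | [] => false
  | a :: r => (decide (a ≠ 0) && pvPre2 r) || pvHasRun3 r

lemma pvPre1_cons (a : Int) (r : List Int) : pvPre1 (a :: r) = decide (a ≠ 0) := rfl
lemma pvPre2_cons (a : Int) (r : List Int) :
    pvPre2 (a :: r) = (decide (a ≠ 0) && pvPre1 r) := rfl
lemma pvHasRun3_cons (a : Int) (r : List Int) :
    pvHasRun3 (a :: r) = ((decide (a ≠ 0) && pvPre2 r) || pvHasRun3 r) := rfl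
lemma pvRowHit_cons (c : Int) (r : List Int) (k : Int) :
    pvRowHit (c :: r) k =
      (if (if c = 0 then (0 : Int) else k + 1) = 3 then true
       else pvRowHit r (if c = 0 then 0 else k + 1)) := rfl

lemma pvPre1_or_pre2 (l : List Int) : (pvPre1 l || pvPre2 l) = pvPre1 l := by
  cases l with
  | nil => rfl
  | cons a r => cases h : decide (a ≠ 0) <;> simp [pvPre1_cons, pvPre2_cons, h]

lemma pvRowHit_char (l : List Int) :
    pvRowHit l 0 = pvHasRun3 l ∧
    pvRowHit l 1 = (pvPre2 l || pvHasRun3 l) ∧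
    pvRowHit l 2 = (pvPre1 l || pvHasRun3 l) := by
  induction l with
  | nil => exact ⟨rfl, rfl, rfl⟩
  | cons c r ih =>
    obtain ⟨h0, h1, h2⟩ := ih
    by_cases hc : c = 0
    · refine ⟨?_, ?_, ?_⟩ <;>
        norm_num [pvRowHit_cons, pvHasRun3_cons, pvPre1_cons, pvPre2_cons, hc, h0]
    · refine ⟨?_, ?_, ?_⟩
      · norm_num [pvRowHit_cons, pvHasRun3_cons, pvPre2_cons, hc, h1, Bool.or_assoc]
      · norm_num [pvRowHit_cons, pvHasRun3_cons, pvPre1_cons, pvPre2_cons, hc, h2]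
        rw [← Bool.or_assoc, pvPre1_or_pre2]
      · norm_num [pvRowHit_cons, pvPre1_cons, hc]

lemma pvWin_char (l : List Int) :
    ((List.range (l.length - 2)).any fun i =>
      ((l.drop i).take 3).all (fun c => decide (c ≠ 0))) = pvHasRun3 l := by
  induction l with
  | nil => rfl
  | cons a r ih =>
    match r with
    | [] => simp [pvHasRun3, pvPre2]
    | [b] => simp [pvHasRun3, pvPre2, pvPre1]
    | b :: c :: r' =>
      have hlen : (a :: b :: c :: r').length - 2 = ((b :: c :: r').length - 2) + 1 := by
        simp
      rw [hlen, List.range_succ_eq_map]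
      simp only [List.any_cons, List.any_map]
      have key : ((List.range ((b :: c :: r').length - 2)).any
          ((fun i => (((a :: b :: c :: r').drop i).take 3).all (fun x => decide (x ≠ 0))) ∘
            Nat.succ)) = pvHasRun3 (b :: c :: r') := by
        rw [← ih]
        exact List.any_congr rfl (fun i => rfl)
      rw [key]
      simp [pvHasRun3_cons, pvPre2_cons, pvPre1_cons]

lemma pvMain (m : List (List Int)) :
    celdas_ocupadas_consecutivas m = celdas_ocupadas_consecutivas_alt m := by
  induction m with
  | nil => rfl
  | cons fila rest ih =>
    have hr : pvRowHit fila 0 =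
        ((List.range (fila.length - 2)).any fun i =>
          ((fila.drop i).take 3).all (fun c => decide (c ≠ 0))) := by
      rw [(pvRowHit_char fila).1, pvWin_char]
    simp only [celdas_ocupadas_consecutivas, celdas_ocupadas_consecutivas_alt,
      List.any_cons, Bool.not_or, hr] at *
    cases h : (List.range (fila.length - 2)).any fun i =>
        ((fila.drop i).take 3).all (fun c => decide (c ≠ 0))
    · simp only [Bool.false_eq_true, if_false, Bool.not_false, Bool.true_and, ih]
    · simp

-- ===== VERDICT (by name: the statement is the Claim_ definition above) =====
theorem celdas_ocupadas_consecutivas_spec : Claim_equal_celdas_ocupadas_consecutivas := by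
  intro m _
  unfold Spec_celdas_ocupadas_consecutivas
  exact pvMain m
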